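-- pv_equiv track=rewrite | github.com/JunPyo0117/Jungle_Algorithm | 정글 - WEEK 1 알고리즘/33. 일곱_난쟁이.py | Dwarfs
-- ===== SOURCE A (Python) =====
-- import copy
--
-- def Dwarfs(arr):
--     dwarfs_tall = 100
--
--     for i in range(len(arr)):
--         temp_arr = copy.deepcopy(arr)
--         temp_arr.pop(i)
--         for j in range(len(temp_arr)):
--             temp_arr2 = copy.deepcopy(temp_arr)
--             temp_arr2.pop(j)
--             if sum(temp_arr2) == dwarfs_tall:
--                 return sorted(temp_arr2)
-- ===== SOURCE B (Python) =====
-- def Dwarfs(arr):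
--     target = sum(arr) - 100
--     for i, v in enumerate(arr):
--         k = next((j for j, x in enumerate(arr) if j != i and x == target - v), None)
--         if k is not None:
--             return sorted(x for j, x in enumerate(arr) if j != i and j != k)
--     return None
-- ===== Notes on version B (the rewrite author's own statement) =====
-- stated objective: faster
-- what changed: B precomputes the total once and, per index i, does a single first-match scan for a partner value target-arr[i] instead of A's nested loop that deep-copies the list, pops, and re-sums the remainder for every index pair.
import Mathlib
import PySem

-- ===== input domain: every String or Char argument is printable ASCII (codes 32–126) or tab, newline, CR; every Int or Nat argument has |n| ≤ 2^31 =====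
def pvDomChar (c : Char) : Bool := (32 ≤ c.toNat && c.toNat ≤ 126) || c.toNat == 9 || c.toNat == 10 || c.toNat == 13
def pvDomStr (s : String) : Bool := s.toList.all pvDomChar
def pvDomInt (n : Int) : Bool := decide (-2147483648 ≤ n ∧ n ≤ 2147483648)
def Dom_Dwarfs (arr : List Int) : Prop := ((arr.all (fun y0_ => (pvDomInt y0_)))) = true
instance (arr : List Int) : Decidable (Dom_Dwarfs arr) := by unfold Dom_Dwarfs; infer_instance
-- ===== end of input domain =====

-- B replaces A's triple nested loop with copies and re-summing by a precomputed total and a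
-- single first-match scan per index (objective: faster).

-- ===== PORT A =====
-- inner 'for j in range(len(temp_arr)): …'
def dwAinner (temp : List Int) : List Int → Option (List Int)
  | [] => none
  | j :: js =>
    match PySem.List.pop? temp j with
    | none => none   -- unreachable: j is always a valid index
    | some (_, temp2) =>
      if temp2.sum = 100 then some (PySem.List.sorted temp2 (fun x => x) false)
      else dwAinner temp js

-- outer 'for i in range(len(arr)): …'
def dwAouter (arr : List Int) : List Int → Option (List Int)
  | [] => none
  | i :: is =>
    match PySem.List.pop? arr i with
    | none => none   -- unreachable: i is always a valid index
    | some (_, temp) =>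
      match dwAinner temp (PySem.List.pyRange 0 (temp.length : Int) 1) with
      | some r => some r
      | none => dwAouter arr is

def Dwarfs (arr : List Int) : Option (List Int) :=
  dwAouter arr (PySem.List.pyRange 0 (arr.length : Int) 1)

-- ===== PORT B =====
-- 'for i, v in enumerate(arr): k = next(…); if k is not None: return sorted(…)'
def dwBloop (arr : List Int) (target : Int) : List (Int × Int) → Option (List Int)
  | [] => none
  | (i, v) :: rest =>
    match (PySem.List.enumerate arr 0).find? (fun p => p.1 != i && p.2 == target - v) with
    | some (k, _) =>
        some (PySem.List.sorted
          (((PySem.List.enumerate arr 0).filter (fun p => p.1 != i && p.1 != k)).map (fun p => p.2))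
          (fun x => x) false)
    | none => dwBloop arr target rest

def Dwarfs_alt (arr : List Int) : Option (List Int) :=
  let target := arr.sum - 100
  dwBloop arr target (PySem.List.enumerate arr 0)

-- ===== PRECONDITION & SPEC =====
def Spec_Dwarfs (arr : List Int) (out : Option (List Int)) : Prop := out = Dwarfs_alt arr
instance (arr : List Int) (out : Option (List Int)) : Decidable (Spec_Dwarfs arr out) := by unfold Spec_Dwarfs; infer_instance

-- ===== CLAIM (what is proved, stated in full; the proofs are below) =====
def Claim_equal_Dwarfs : Prop := ∀ (arr : List Int), Dom_Dwarfs arr → Spec_Dwarfs arr (Dwarfs arr)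

-- ===== LEMMAS AND PROOFS =====

-- remove the first occurrence of w, or none if absent
def findErase (w : Int) : List Int → Option (List Int)
  | [] => none
  | t :: ts => if t = w then some ts else (findErase w ts).map (fun r => t :: r)

lemma sum_eraseIdx_int (xs : List Int) (j : Nat) (h : j < xs.length) :
    (xs.eraseIdx j).sum = xs.sum - xs[j] := by
  have h1 : (xs.eraseIdx j).sum = (xs.take j).sum + (xs.drop (j + 1)).sum := by
    rw [List.eraseIdx_eq_take_drop_succ, List.sum_append]
  have h2 : xs.sum = (xs.take j).sum + (xs.drop j).sum := by
    conv_lhs => rw [← List.take_append_drop j xs]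
    rw [List.sum_append]
  have h3 : (xs.drop j).sum = xs[j] + (xs.drop (j + 1)).sum := by
    rw [← List.getElem_cons_drop h, List.sum_cons]
  omega

lemma innerA_spec (temp : List Int) : ∀ (m a : Nat), temp.length - a = m → a ≤ temp.length →
    dwAinner temp (PySem.List.pyRange a temp.length 1) =
      (findErase (temp.sum - 100) (temp.drop a)).map
        (fun r => PySem.List.sorted (temp.take a ++ r) (fun x => x) false) := by
  intro m
  induction m with
  | zero =>
    intro a hm ha
    have : a = temp.length := by omega
    subst this
    rw [PySem.List.pyRange_one_eq_nil (by omega)]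
    simp [dwAinner, findErase]
  | succ m ih =>
    intro a hm ha
    have hlt : a < temp.length := by omega
    rw [PySem.List.pyRange_one_cons (by exact_mod_cast hlt)]
    have hpop : PySem.List.pop? temp (a : Int) = some (temp[a], temp.eraseIdx a) :=
      PySem.List.pop?_natCast _ a hlt
    rw [dwAinner, hpop]
    dsimp only
    have hdrop : temp.drop a = temp[a] :: temp.drop (a + 1) := (List.getElem_cons_drop hlt).symm
    by_cases hw : temp[a] = temp.sum - 100
    · have : (temp.eraseIdx a).sum = 100 := by
        rw [sum_eraseIdx_int temp a hlt]; omega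
      rw [if_pos this, hdrop]
      simp only [findErase]
      rw [if_pos hw]
      simp [List.eraseIdx_eq_take_drop_succ]
    · have : ¬ (temp.eraseIdx a).sum = 100 := by
        rw [sum_eraseIdx_int temp a hlt]; omega
      rw [if_neg this]
      have hcast : (a : Int) + 1 = ((a + 1 : Nat) : Int) := by push_cast; ring
      rw [hcast, ih (a + 1) (by omega) (by omega)]
      rw [hdrop]
      simp only [findErase]
      rw [if_neg hw]
      cases hfe : findErase (temp.sum - 100) (temp.drop (a + 1)) with
      | none => simp only [Option.map_none]
      | some r =>
        simp only [Option.map_some]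
        congr 1
        have ht : temp.take (a + 1) = temp.take a ++ [temp[a]] := by
          rw [List.take_add_one, List.getElem?_eq_getElem hlt]; rfl
        rw [ht, List.append_assoc]
        rfl

lemma find?_and_eq_filter {α : Type} (q p : α → Bool) :
    ∀ (l : List α), l.find? (fun x => q x && p x) = (l.filter q).find? p := by
  intro l
  induction l with
  | nil => rfl
  | cons x xs ih =>
    by_cases hq : q x
    · by_cases hp : p x
      · rw [List.find?_cons_of_pos (by simp [hq, hp]), List.filter_cons_of_pos hq,
          List.find?_cons_of_pos hp]
      · rw [List.find?_cons_of_neg (by simp [hq, hp]), List.filter_cons_of_pos hq,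
          List.find?_cons_of_neg (by simp [hp]), ih]
    · rw [List.find?_cons_of_neg (by simp [hq]), List.filter_cons_of_neg (by simp [hq]), ih]

lemma scanPairs (w : Int) : ∀ (l : List (Int × Int)), (l.map (fun p => p.1)).Nodup →
    ((l.find? (fun p => p.2 == w)).map
      (fun p => (l.filter (fun q => q.1 != p.1)).map (fun q => q.2)))
    = findErase w (l.map (fun p => p.2)) := by
  intro l
  induction l with
  | nil => intro _; rfl
  | cons hd tl ih =>
    intro hnd
    obtain ⟨k0, v0⟩ := hd
    simp only [List.map_cons, List.nodup_cons] at hnd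
    by_cases hv : v0 = w
    · rw [List.find?_cons_of_pos (by simp [hv])]
      simp only [Option.map_some, List.filter_cons]
      rw [if_neg (by simp)]
      have : tl.filter (fun q => q.1 != k0) = tl := by
        apply List.filter_eq_self.mpr
        intro p hp
        have hne : p.1 ≠ k0 := fun h => hnd.1 (List.mem_map.mpr ⟨p, hp, h⟩)
        simpa using hne
      rw [this, List.map_cons, findErase, if_pos hv]
    · rw [List.find?_cons_of_neg (by simp [hv])]
      rw [List.map_cons, findErase, if_neg hv, ← ih hnd.2]
      cases hf : tl.find? (fun p => p.2 == w) with
      | none => simp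
      | some pk =>
        simp only [Option.map_some]
        congr 1
        have hkmem : pk ∈ tl := List.mem_of_find?_eq_some hf
        have hne : (k0 != pk.1) = true := by
          have : k0 ≠ pk.1 := fun h => hnd.1 (List.mem_map.mpr ⟨pk, hkmem, h.symm⟩)
          simpa using this
        rw [List.filter_cons, if_pos hne, List.map_cons]

lemma enum_fst_ge (xs : List Int) : ∀ (s : Int), ∀ p ∈ PySem.List.enumerate xs s, s ≤ p.1 := by
  induction xs with
  | nil => intro s p hp; simp [PySem.List.enumerate_nil] at hp
  | cons x t ih =>
    intro s p hp
    rw [PySem.List.enumerate_cons] at hp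
    rcases List.mem_cons.mp hp with h | h
    · simp [h]
    · have := ih (s + 1) p h; omega

lemma filter_ne_map_enumerate (xs : List Int) :
    ∀ (i : Nat) (s : Int), i < xs.length →
    ((PySem.List.enumerate xs s).filter (fun p => p.1 != s + i)).map (fun p => p.2)
      = xs.eraseIdx i := by
  induction xs with
  | nil => intro i s h; simp at h
  | cons x t ih =>
    intro i s h
    rw [PySem.List.enumerate_cons, List.filter_cons]
    cases i with
    | zero =>
      rw [if_neg (by simp)]
      have : (PySem.List.enumerate t (s + 1)).filter (fun p => p.1 != s + (0:Nat)) =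
          PySem.List.enumerate t (s + 1) := by
        apply List.filter_eq_self.mpr
        intro p hp
        have := enum_fst_ge t (s + 1) p hp
        simp only [bne_iff_ne, ne_eq]
        intro heq; omega
      rw [this, PySem.List.map_snd_enumerate, List.eraseIdx_cons_zero]
    | succ i =>
      rw [if_pos (by simp only [bne_iff_ne, ne_eq]; push_cast; omega)]
      rw [List.map_cons, List.eraseIdx_cons_succ]
      have : s + ((i + 1 : Nat) : Int) = (s + 1) + (i : Nat) := by push_cast; ring
      rw [this, ih i (s + 1) (by simpa using h)]

lemma enum_fst_nodup (xs : List Int) (s : Int) :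
    ((PySem.List.enumerate xs s).map (fun p => p.1)).Nodup := by
  have h := PySem.List.map_fst_enumerate xs s
  simp only at h
  rw [h]
  exact PySem.List.nodup_pyRange_one _ _

lemma outer_spec (arr : List Int) : ∀ (m a : Nat), arr.length - a = m → a ≤ arr.length →
    dwAouter arr (PySem.List.pyRange a arr.length 1) =
      dwBloop arr (arr.sum - 100) (PySem.List.enumerate (arr.drop a) a) := by
  intro m
  induction m with
  | zero =>
    intro a hm ha
    have : a = arr.length := by omega
    subst this
    rw [PySem.List.pyRange_one_eq_nil (by omega)]
    simp [dwAouter, dwBloop, PySem.List.enumerate_nil]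
  | succ m ih =>
    intro a hm ha
    have hlt : a < arr.length := by omega
    rw [PySem.List.pyRange_one_cons (by exact_mod_cast hlt)]
    have hpop : PySem.List.pop? arr (a : Int) = some (arr[a], arr.eraseIdx a) :=
      PySem.List.pop?_natCast _ a hlt
    rw [dwAouter, hpop]
    dsimp only
    have hdrop : arr.drop a = arr[a] :: arr.drop (a + 1) := (List.getElem_cons_drop hlt).symm
    rw [hdrop, PySem.List.enumerate_cons, dwBloop]
    set temp := arr.eraseIdx a with htemp
    set w := arr.sum - 100 - arr[a] with hw
    -- A's inner loop finds the first element of temp equal to w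
    have hA : dwAinner temp (PySem.List.pyRange 0 (temp.length : Int) 1) =
        (findErase w temp).map (fun r => PySem.List.sorted r (fun x => x) false) := by
      have h0 := innerA_spec temp temp.length 0 (by omega) (by omega)
      simp only [Nat.cast_zero, List.drop_zero, List.take_zero, List.nil_append] at h0
      rw [h0]
      congr 2
      rw [htemp, sum_eraseIdx_int arr a hlt, hw]
      ring
    -- B's scan over enumerate finds the first index ≠ a holding w
    have hfind : (PySem.List.enumerate arr 0).find? (fun p => p.1 != (a : Int) && p.2 == w) =
        ((PySem.List.enumerate arr 0).filter (fun p => p.1 != (a : Int))).find?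
          (fun p => p.2 == w) := find?_and_eq_filter _ _ _
    have hfiltmap : ((PySem.List.enumerate arr 0).filter (fun p => p.1 != (a : Int))).map
        (fun p => p.2) = temp := by
      have := filter_ne_map_enumerate arr a 0 hlt
      simpa using this
    have hnd : (((PySem.List.enumerate arr 0).filter (fun p => p.1 != (a : Int))).map
        (fun p => p.1)).Nodup := by
      have hsub : ((PySem.List.enumerate arr 0).filter (fun p => p.1 != (a : Int))).Sublist
          (PySem.List.enumerate arr 0) := List.filter_sublist
      exact (enum_fst_nodup arr 0).sublist (hsub.map _)
    have hB := scanPairs w ((PySem.List.enumerate arr 0).filter (fun p => p.1 != (a : Int))) hnd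
    rw [hfiltmap] at hB
    -- combine
    rw [hA, hfind]
    cases hf : ((PySem.List.enumerate arr 0).filter (fun p => p.1 != (a : Int))).find?
        (fun p => p.2 == w) with
    | none =>
      rw [hf] at hB
      simp only [Option.map_none] at hB
      rw [← hB]
      simp only [Option.map_none]
      have hcast : (a : Int) + 1 = ((a + 1 : Nat) : Int) := by push_cast; ring
      rw [hcast]
      exact ih (a + 1) (by omega) (by omega)
    | some pk =>
      rw [hf] at hB
      simp only [Option.map_some] at hB
      obtain ⟨k, v⟩ := pk
      have hff : (PySem.List.enumerate arr 0).filter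
          (fun p => p.1 != (a : Int) && p.1 != k) =
          ((PySem.List.enumerate arr 0).filter (fun p => p.1 != (a : Int))).filter
            (fun p => p.1 != k) := by
        rw [List.filter_filter]
        apply List.filter_congr
        intro p _
        exact Bool.and_comm _ _
      dsimp only
      rw [← hB]
      dsimp only
      rw [hff]
      simp only [Option.map_some]

theorem dwarfs_eq (arr : List Int) : Dwarfs arr = Dwarfs_alt arr := by
  unfold Dwarfs Dwarfs_alt
  have h := outer_spec arr arr.length 0 (by omega) (by omega)
  simp only [Nat.cast_zero, List.drop_zero] at h
  exact h

-- ===== VERDICT (by name: the statement is the Claim_ definition above) =====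
theorem Dwarfs_spec : Claim_equal_Dwarfs := by
  intro arr _
  unfold Spec_Dwarfs
  exact dwarfs_eq arr
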